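-- pv_equiv track=rewrite | github.com/4geru/react-study | nlp_python_100/section1/002.py | select_string
-- ===== SOURCE A (Python) =====
-- def select_string(str, odd_or_even='odd'):
--     skip_index = (1 if odd_or_even == 'odd' else 0)
--     return_str = ''
--     for i in range(len(str)):
--         if i % 2 == skip_index:
--             continue
--
--         return_str += str[i]
--
--     return return_str
-- ===== SOURCE B (Python) =====
-- def select_string(str, odd_or_even='odd'):
--     start = 0 if odd_or_even == 'odd' else 1
--     return str[start::2]
-- ===== Notes on version B (the rewrite author's own statement) =====
-- stated objective: simpler
-- what changed: Replaces the per-index loop with parity test, continue and repeated string concatenation by a single closed-form stride-2 slice str[start::2] with start chosen from the mode.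
import Mathlib
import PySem

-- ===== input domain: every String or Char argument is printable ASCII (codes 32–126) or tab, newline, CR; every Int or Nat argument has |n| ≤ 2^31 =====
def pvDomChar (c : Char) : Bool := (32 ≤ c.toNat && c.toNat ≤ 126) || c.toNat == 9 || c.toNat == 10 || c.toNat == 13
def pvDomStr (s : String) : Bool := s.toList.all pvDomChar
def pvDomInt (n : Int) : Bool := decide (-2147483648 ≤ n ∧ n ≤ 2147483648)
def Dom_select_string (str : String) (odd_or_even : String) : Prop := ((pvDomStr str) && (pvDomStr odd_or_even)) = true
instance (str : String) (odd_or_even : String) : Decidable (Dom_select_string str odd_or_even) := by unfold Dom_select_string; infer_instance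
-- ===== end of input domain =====

-- B replaces A's per-index loop (parity test / continue / concatenation) with one stride-2 slice: simpler.

-- ===== PORT A =====
-- loop over range(len(str)); skip indices with i % 2 == skip_index; append str[i] otherwise
def select_string (str : String) (odd_or_even : String) : String :=
  let skip_index : Int := if odd_or_even == "odd" then 1 else 0
  let return_str : List Char :=
    (PySem.List.pyRange 0 (PySem.Str.len str) 1).foldl
      (fun acc i =>
        if PySem.Int.mod i 2 == skip_index then acc
        else acc ++ (PySem.List.pyGet? str.toList i).toList) []
  String.ofList return_str

-- ===== PORT B =====
-- start = 0 if odd_or_even == 'odd' else 1; return str[start::2]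
def select_string_alt (str : String) (odd_or_even : String) : String :=
  let start : Int := if odd_or_even == "odd" then 0 else 1
  (PySem.Str.slice? str (some start) none 2).getD ""

-- ===== PRECONDITION & SPEC =====
def Spec_select_string (str : String) (odd_or_even : String) (out : String) : Prop := out = select_string_alt str odd_or_even
instance (str : String) (odd_or_even : String) (out : String) : Decidable (Spec_select_string str odd_or_even out) := by unfold Spec_select_string; infer_instance

-- ===== CLAIM (what is proved, stated in full; the proofs are below) =====
def Claim_equal_select_string : Prop := ∀ (str : String) (odd_or_even : String), Dom_select_string str odd_or_even → Spec_select_string str odd_or_even (select_string str odd_or_even)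

-- ===== LEMMAS AND PROOFS =====

-- the elements at even positions (0,2,4,…) of a list
def pvEveryOther {α : Type} : List α → List α
  | [] => []
  | [a] => [a]
  | a :: _ :: t => a :: pvEveryOther t

lemma pvFilterMap_two {α : Type} (cs : List α) :
    List.filterMap (fun k => cs[2 * k]?) (List.range ((cs.length + 1) / 2)) = pvEveryOther cs := by
  induction cs using pvEveryOther.induct with
  | case1 => simp [pvEveryOther]
  | case2 a => simp [pvEveryOther]
  | case3 a b t ih =>
    have h : ((a :: b :: t).length + 1) / 2 = ((t.length + 1) / 2) + 1 := by simp; omega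
    rw [h, List.range_succ_eq_map, List.filterMap_cons, List.filterMap_map]
    simp only [pvEveryOther]
    have h2 : ((fun k => (a :: b :: t)[2 * k]?) ∘ Nat.succ) = fun k => t[2 * k]? := by
      funext k
      have h3 : 2 * Nat.succ k = (2 * k) + 1 + 1 := by omega
      simp [Function.comp, h3]
    rw [h2, ih]
    simp

lemma pvSliceB0 {α : Type} (cs : List α) :
    PySem.List.slice? cs (some 0) none 2 = some (pvEveryOther cs) := by
  unfold PySem.List.slice? PySem.List.sliceIndices
  norm_num
  have hc : (if 0 < cs.length then (((cs.length : Int) + 2 - 1) / 2).toNat else 0) = (cs.length + 1) / 2 := by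
    split <;> omega
  have hf : (fun x : Nat => cs[((2 : Int) * ↑x).toNat]?) = fun x => cs[2 * x]? := by
    funext x
    have h : ((2 : Int) * ↑x).toNat = 2 * x := by omega
    rw [h]
  rw [hc, hf, pvFilterMap_two]

lemma pvSliceB1 {α : Type} (cs : List α) :
    PySem.List.slice? cs (some 1) none 2 = some (pvEveryOther cs.tail) := by
  match cs with
  | [] => rfl
  | a :: t =>
    unfold PySem.List.slice? PySem.List.sliceIndices
    norm_num
    have hc : (if 0 < t.length then (((t.length : Int) + 2 - 1) / 2).toNat else 0) = (t.length + 1) / 2 := by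
      split <;> omega
    have hf : (fun x : Nat => (a :: t)[((1 : Int) + 2 * ↑x).toNat]?) = fun x => t[2 * x]? := by
      funext x
      have h : ((1 : Int) + 2 * ↑x).toNat = 2 * x + 1 := by omega
      rw [h]
      simp
    rw [hc, hf, pvFilterMap_two]

lemma pvFoldA_even {α : Type} (cs : List α) (acc : List α) :
    List.foldl (fun x y => if y % 2 = 1 then x else x ++ (cs[y]?).toList)
      acc (List.range cs.length) = acc ++ pvEveryOther cs := by
  induction cs using pvEveryOther.induct generalizing acc with
  | case1 => simp [pvEveryOther]
  | case2 a => simp [pvEveryOther]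
  | case3 a b t ih =>
    have h1 : (a :: b :: t).length = (t.length + 1) + 1 := rfl
    rw [h1, List.range_succ_eq_map, List.foldl_cons, List.foldl_map,
        List.range_succ_eq_map, List.foldl_cons, List.foldl_map]
    norm_num
    have hf : ∀ y : Nat, ((y + 1 + 1) % 2 = 1) ↔ (y % 2 = 1) := by intro y; omega
    simp only [hf, ih, pvEveryOther]
    simp

lemma pvFoldA_odd {α : Type} (cs : List α) (acc : List α) :
    List.foldl (fun x y => if y % 2 = 0 then x else x ++ (cs[y]?).toList)
      acc (List.range cs.length) = acc ++ pvEveryOther cs.tail := by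
  match cs with
  | [] => simp [pvEveryOther]
  | a :: t =>
    rw [List.length_cons, List.range_succ_eq_map, List.foldl_cons, List.foldl_map]
    norm_num
    have hf : ∀ y : Nat, ((y + 1) % 2 = 0) ↔ (y % 2 = 1) := by intro y; omega
    simp only [hf]
    exact pvFoldA_even t acc

lemma pvMod2_beq1 (y : Nat) : ((PySem.Int.mod (↑y) 2 == (1 : Int)) = true) ↔ (y % 2 = 1) := by
  simp [PySem.Int.mod, Int.fmod_eq_emod]
  omega

lemma pvMod2_beq0 (y : Nat) : ((PySem.Int.mod (↑y) 2 == (0 : Int)) = true) ↔ (y % 2 = 0) := by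
  simp [PySem.Int.mod, Int.fmod_eq_emod]
  omega

-- ===== VERDICT (by name: the statement is the Claim_ definition above) =====
theorem select_string_spec : Claim_equal_select_string := by
  intro str oe _
  unfold Spec_select_string select_string select_string_alt
  rw [PySem.Str.len_eq, PySem.List.pyRange_zero_natCast]
  by_cases h : (oe == "odd") = true
  · simp only [h, if_true, List.foldl_map, PySem.List.pyGet?_natCast]
    rw [PySem.Str.slice?]
    rw [PySem.Chars.slice?_eq_listSlice?, pvSliceB0]
    simp only [pvMod2_beq1]
    rw [pvFoldA_even str.toList []]
    simp
  · rw [Bool.not_eq_true] at h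
    simp only [h, Bool.false_eq_true, if_false, List.foldl_map, PySem.List.pyGet?_natCast]
    rw [PySem.Str.slice?]
    rw [PySem.Chars.slice?_eq_listSlice?, pvSliceB1]
    simp only [pvMod2_beq0]
    rw [pvFoldA_odd str.toList []]
    simp
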